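-- pv_equiv track=rewrite | github.com/Hamkua/Algorithm | 프로그래머스/lv1/42862. 체육복/체육복.py | solution
-- ===== SOURCE A (Python) =====
-- def solution(n, lost, reserve):
--     answer = 0
--     dx = [-1, 1]
--
--     intersection = set(reserve) & set(lost)
--     reserve = list(set(reserve) - intersection)
--     lost = list(set(lost) - intersection)
--
--     reserve.sort()
--     for i in range(len(reserve)):
--         for j in range(2):
--             nx = reserve[i] + dx[j]
--             if(0<nx<=n):
--                 if nx in lost:
--                     lost.remove(nx)
--                     break
--
--     answer = n - len(lost)
--
--     return answer
-- ===== SOURCE B (Python) =====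
-- def solution(n, lost, reserve):
--     # Two-pointer sweep over the two sorted, deduplicated, disjoint lists
--     # instead of A's membership-scan-and-remove inner loop.
--     inter = set(lost) & set(reserve)
--     lostset = set(lost) - inter
--     L = sorted(x for x in lostset if 0 < x <= n)
--     R = sorted(set(reserve) - inter)
--     out_of_range = len(lostset) - len(L)
--     i = j = matches = 0
--     while i < len(L) and j < len(R):
--         if L[i] < R[j] - 1:
--             i += 1
--         elif R[j] + 1 < L[i]:
--             j += 1
--         else:
--             matches += 1
--             i += 1
--             j += 1
--     return n - out_of_range - (len(L) - matches)
-- ===== Notes on version B (the rewrite author's own statement) =====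
-- stated objective: faster
-- what changed: A iterates the sorted reserve list and, for each reserve, membership-scans and removes from the lost list (quadratic inner scans); B sorts the deduplicated in-range lost and reserve lists once and counts matches in a single two-pointer sweep with no inner scan.
import Mathlib
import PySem

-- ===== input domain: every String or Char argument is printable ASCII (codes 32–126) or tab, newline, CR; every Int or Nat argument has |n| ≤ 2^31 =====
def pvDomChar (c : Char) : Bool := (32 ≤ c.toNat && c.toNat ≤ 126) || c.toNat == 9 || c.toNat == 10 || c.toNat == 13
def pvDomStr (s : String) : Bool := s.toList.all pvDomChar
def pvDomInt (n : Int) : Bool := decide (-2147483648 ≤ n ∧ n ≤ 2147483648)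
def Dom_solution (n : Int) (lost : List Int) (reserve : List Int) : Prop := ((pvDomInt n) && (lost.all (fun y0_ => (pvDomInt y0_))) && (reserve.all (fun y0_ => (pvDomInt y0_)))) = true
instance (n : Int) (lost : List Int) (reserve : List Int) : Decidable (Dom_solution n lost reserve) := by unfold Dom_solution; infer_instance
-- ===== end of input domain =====

-- B replaces A's per-reserve membership-scan-and-remove loop with a two-pointer sweep over the two sorted deduplicated lists (alternative decomposition; the inner list scans disappear).


-- ===== PORT A =====
-- one iteration of A's outer loop body (the inner 'for j in range(2)' with break; nx = reserve[i] + dx[j], dx = [-1, 1])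
def aStep (n : Int) (lost : List Int) (r : Int) : List Int :=
  let nx1 := r + (-1)
  if (0 < nx1 ∧ nx1 ≤ n) ∧ nx1 ∈ lost then lost.erase nx1
  else
    let nx2 := r + 1
    if (0 < nx2 ∧ nx2 ≤ n) ∧ nx2 ∈ lost then lost.erase nx2
    else lost

def solution (n : Int) (lost : List Int) (reserve : List Int) : Int :=
  let inter := PySem.Set.inter (PySem.Set.ofList reserve) (PySem.Set.ofList lost)
  let reserve1 := PySem.Set.diff (PySem.Set.ofList reserve) inter
  let lost1 := PySem.Set.diff (PySem.Set.ofList lost) inter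
  let reserve2 := PySem.List.sorted reserve1 (fun x => x) false
  let lostF := reserve2.foldl (aStep n) lost1
  n - lostF.length

-- ===== PORT B =====
-- B's while loop over the two sorted lists (the i/j pointers rendered as list tails)
def tpLoop : List Int → List Int → Int
  | [], _ => 0
  | _ :: _, [] => 0
  | l :: L, r :: R =>
    if l < r - 1 then tpLoop L (r :: R)
    else if r + 1 < l then tpLoop (l :: L) R
    else 1 + tpLoop L R
termination_by L R => L.length + R.length

def solution_alt (n : Int) (lost : List Int) (reserve : List Int) : Int :=
  let inter := PySem.Set.inter (PySem.Set.ofList lost) (PySem.Set.ofList reserve)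
  let lostset := PySem.Set.diff (PySem.Set.ofList lost) inter
  let L := PySem.List.sorted (lostset.filter (fun x => decide (0 < x ∧ x ≤ n))) (fun x => x) false
  let R := PySem.List.sorted (PySem.Set.diff (PySem.Set.ofList reserve) inter) (fun x => x) false
  let outOfRange : Int := (lostset.length : Int) - L.length
  n - outOfRange - ((L.length : Int) - tpLoop L R)

-- ===== PRECONDITION & SPEC =====
def Spec_solution (n : Int) (lost : List Int) (reserve : List Int) (out : Int) : Prop := out = solution_alt n lost reserve
instance (n : Int) (lost : List Int) (reserve : List Int) (out : Int) : Decidable (Spec_solution n lost reserve out) := by unfold Spec_solution; infer_instance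

-- ===== CLAIM (what is proved, stated in full; the proofs are below) =====
def Claim_equal_solution : Prop := ∀ (n : Int) (lost : List Int) (reserve : List Int), Dom_solution n lost reserve → Spec_solution n lost reserve (solution n lost reserve)

-- ===== LEMMAS AND PROOFS =====

-- match count of A's greedy, value-based (how many lost elements A's loop removes)
def mc (n : Int) : List Int → List Int → Int
  | [], _ => 0
  | r :: R, lost =>
    if (0 < r + (-1) ∧ r + (-1) ≤ n) ∧ r + (-1) ∈ lost then 1 + mc n R (lost.erase (r + (-1)))
    else if (0 < r + 1 ∧ r + 1 ≤ n) ∧ r + 1 ∈ lost then 1 + mc n R (lost.erase (r + 1))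
    else mc n R lost

theorem foldl_aStep_length (n : Int) : ∀ (R lost : List Int),
    ((R.foldl (aStep n) lost).length : Int) = (lost.length : Int) - mc n R lost := by
  intro R
  induction R with
  | nil => intro lost; simp [mc]
  | cons r R ih =>
    intro lost
    simp only [List.foldl_cons, mc, aStep]
    by_cases h1 : (0 < r + (-1) ∧ r + (-1) ≤ n) ∧ r + (-1) ∈ lost
    · rw [if_pos h1, if_pos h1, ih, List.length_erase_of_mem h1.2]
      have : 1 ≤ lost.length := List.length_pos_of_mem h1.2
      omega
    · rw [if_neg h1, if_neg h1]
      by_cases h2 : (0 < r + 1 ∧ r + 1 ≤ n) ∧ r + 1 ∈ lost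
      · rw [if_pos h2, if_pos h2, ih, List.length_erase_of_mem h2.2]
        have : 1 ≤ lost.length := List.length_pos_of_mem h2.2
        omega
      · rw [if_neg h2, if_neg h2, ih]

theorem mc_perm (n : Int) : ∀ (R l₁ l₂ : List Int), l₁.Perm l₂ → mc n R l₁ = mc n R l₂ := by
  intro R
  induction R with
  | nil => intro l₁ l₂ _; simp [mc]
  | cons r R ih =>
    intro l₁ l₂ hp
    simp only [mc, hp.mem_iff]
    by_cases h1 : (0 < r + (-1) ∧ r + (-1) ≤ n) ∧ r + (-1) ∈ l₂
    · rw [if_pos h1, if_pos h1, ih _ _ (hp.erase _)]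
    · rw [if_neg h1, if_neg h1]
      by_cases h2 : (0 < r + 1 ∧ r + 1 ≤ n) ∧ r + 1 ∈ l₂
      · rw [if_pos h2, if_pos h2, ih _ _ (hp.erase _)]
      · rw [if_neg h2, if_neg h2, ih _ _ hp]

theorem erase_filter_comm (p : Int → Bool) (a : Int) (hpa : p a = true) :
    ∀ l : List Int, (l.filter p).erase a = (l.erase a).filter p := by
  intro l
  induction l with
  | nil => simp
  | cons x l ih =>
    by_cases hx : x = a
    · subst hx
      simp [hpa, List.erase_cons_head]
    · have hbe : (x == a) = false := by simp [hx]
      by_cases hp : p x = true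
      · simp [hp, hbe, ih]
      · simp only [Bool.not_eq_true] at hp
        simp [hp, hbe, ih]

theorem mc_filter (n : Int) : ∀ (R lost : List Int),
    mc n R lost = mc n R (lost.filter (fun x => decide (0 < x ∧ x ≤ n))) := by
  intro R
  induction R with
  | nil => intro lost; simp [mc]
  | cons r R ih =>
    intro lost
    have hmem : ∀ x : Int, (0 < x ∧ x ≤ n) →
        (x ∈ lost ↔ x ∈ lost.filter (fun x => decide (0 < x ∧ x ≤ n))) := by
      intro x hx; simp [List.mem_filter, hx]
    simp only [mc]
    by_cases h1 : (0 < r + (-1) ∧ r + (-1) ≤ n) ∧ r + (-1) ∈ lost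
    · have h1' : (0 < r + (-1) ∧ r + (-1) ≤ n) ∧
          r + (-1) ∈ lost.filter (fun x => decide (0 < x ∧ x ≤ n)) :=
        ⟨h1.1, (hmem _ h1.1).mp h1.2⟩
      rw [if_pos h1, if_pos h1', ih, erase_filter_comm _ _ (by simp [h1.1])]
    · have h1' : ¬ ((0 < r + (-1) ∧ r + (-1) ≤ n) ∧
          r + (-1) ∈ lost.filter (fun x => decide (0 < x ∧ x ≤ n))) := by
        intro h; exact h1 ⟨h.1, (hmem _ h.1).mpr h.2⟩
      rw [if_neg h1, if_neg h1']
      by_cases h2 : (0 < r + 1 ∧ r + 1 ≤ n) ∧ r + 1 ∈ lost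
      · have h2' : (0 < r + 1 ∧ r + 1 ≤ n) ∧
            r + 1 ∈ lost.filter (fun x => decide (0 < x ∧ x ≤ n)) :=
          ⟨h2.1, (hmem _ h2.1).mp h2.2⟩
        rw [if_pos h2, if_pos h2', ih, erase_filter_comm _ _ (by simp [h2.1])]
      · have h2' : ¬ ((0 < r + 1 ∧ r + 1 ≤ n) ∧
            r + 1 ∈ lost.filter (fun x => decide (0 < x ∧ x ≤ n))) := by
          intro h; exact h2 ⟨h.1, (hmem _ h.1).mpr h.2⟩
        rw [if_neg h2, if_neg h2', ih]

theorem mc_nil (n : Int) : ∀ R : List Int, mc n R [] = 0 := by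
  intro R; induction R with
  | nil => simp [mc]
  | cons r R ih => simp [mc, ih]

-- an element smaller than every r-1 for r in R is never touched by A's loop
theorem mc_skip (n : Int) : ∀ (R : List Int) (l : Int) (L : List Int),
    (∀ r ∈ R, l < r - 1) → mc n R (l :: L) = mc n R L := by
  intro R
  induction R with
  | nil => intro l L _; simp [mc]
  | cons r R ih =>
    intro l L hsmall
    have hr : l < r - 1 := hsmall r (by simp)
    have hne1 : r + (-1) ≠ l := by omega
    have hne2 : r + 1 ≠ l := by omega
    have hm1 : (r + (-1) ∈ l :: L) ↔ (r + (-1) ∈ L) := by simp [hne1]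
    have hm2 : (r + 1 ∈ l :: L) ↔ (r + 1 ∈ L) := by simp [hne2]
    have he1 : (l :: L).erase (r + (-1)) = l :: L.erase (r + (-1)) :=
      List.erase_cons_tail (by simp; omega)
    have he2 : (l :: L).erase (r + 1) = l :: L.erase (r + 1) :=
      List.erase_cons_tail (by simp; omega)
    have htail : ∀ r' ∈ R, l < r' - 1 := fun r' hr' => hsmall r' (by simp [hr'])
    simp only [mc, hm1, hm2, he1, he2]
    by_cases h1 : (0 < r + (-1) ∧ r + (-1) ≤ n) ∧ r + (-1) ∈ L
    · rw [if_pos h1, if_pos h1, ih _ _ htail]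
    · rw [if_neg h1, if_neg h1]
      by_cases h2 : (0 < r + 1 ∧ r + 1 ≤ n) ∧ r + 1 ∈ L
      · rw [if_pos h2, if_pos h2, ih _ _ htail]
      · rw [if_neg h2, if_neg h2, ih _ _ htail]

theorem mc_eq_tpLoop (n : Int) : ∀ (k : Nat) (L R : List Int),
    L.length + R.length ≤ k →
    L.Pairwise (· < ·) → R.Pairwise (· < ·) →
    (∀ x ∈ L, 0 < x ∧ x ≤ n) → (∀ r ∈ R, r ∉ L) →
    mc n R L = tpLoop L R := by
  intro k
  induction k with
  | zero =>
    intro L R hk _ _ _ _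
    have hL : L = [] := by cases L <;> simp_all
    have hR : R = [] := by cases R <;> simp_all
    subst hL; subst hR; simp [mc, tpLoop]
  | succ k ih =>
    intro L R hk hLs hRs hrange hdisj
    match L, R with
    | [], R => rw [mc_nil]; cases R <;> simp [tpLoop]
    | l :: L', [] => simp [mc, tpLoop]
    | l :: L', r :: R' =>
      have hLhead := (List.pairwise_cons.mp hLs).1
      have hLtail := (List.pairwise_cons.mp hLs).2
      have hRhead := (List.pairwise_cons.mp hRs).1
      have hRtail := (List.pairwise_cons.mp hRs).2
      have hmin : ∀ x ∈ l :: L', l ≤ x := by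
        intro x hx
        rcases List.mem_cons.mp hx with h | h
        · omega
        · exact le_of_lt (hLhead x h)
      simp only [List.length_cons] at hk
      by_cases hlt : l < r - 1
      · -- tp drops l; mc never touches l
        have hsmall : ∀ r' ∈ r :: R', l < r' - 1 := by
          intro r' hr'
          rcases List.mem_cons.mp hr' with h | h
          · omega
          · have := hRhead r' h; omega
        rw [mc_skip n _ _ _ hsmall, tpLoop, if_pos hlt]
        exact ih L' (r :: R') (by simp; omega) hLtail hRs
          (fun x hx => hrange x (by simp [hx]))
          (fun r' hr' hx => hdisj r' hr' (by simp [hx]))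
      · by_cases hgt : r + 1 < l
        · -- r matches nothing: r-1 and r+1 are below every element of L
          have hn1 : r + (-1) ∉ l :: L' := fun h => by have := hmin _ h; omega
          have hn2 : r + 1 ∉ l :: L' := fun h => by have := hmin _ h; omega
          rw [tpLoop, if_neg hlt, if_pos hgt]
          rw [show mc n (r :: R') (l :: L') = mc n R' (l :: L') by
            simp only [mc]
            rw [if_neg (fun h => hn1 h.2), if_neg (fun h => hn2 h.2)]]
          exact ih (l :: L') R' (by simp; omega) hLs hRtail hrange
            (fun r' hr' => hdisj r' (by simp [hr']))
        · -- a match: l = r-1 or l = r+1 (l ≠ r by disjointness)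
          have hne : l ≠ r := fun h => hdisj r (by simp) (by simp [h])
          have hcase : l = r + (-1) ∨ l = r + 1 := by omega
          rw [tpLoop, if_neg hlt, if_neg hgt]
          have hIH : mc n R' L' = tpLoop L' R' :=
            ih L' R' (by omega) hLtail hRtail
              (fun x hx => hrange x (by simp [hx]))
              (fun r' hr' hx => hdisj r' (by simp [hr']) (by simp [hx]))
          rcases hcase with hl | hl
          · have h1 : (0 < r + (-1) ∧ r + (-1) ≤ n) ∧ r + (-1) ∈ l :: L' := by
              refine ⟨?_, by simp [hl]⟩
              have := hrange l (by simp); omega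
            rw [mc, if_pos h1, ← hl, List.erase_cons_head, hIH]
          · have hn1 : r + (-1) ∉ l :: L' := fun h => by have := hmin _ h; omega
            have h2 : (0 < r + 1 ∧ r + 1 ≤ n) ∧ r + 1 ∈ l :: L' := by
              refine ⟨?_, by simp [hl]⟩
              have := hrange l (by simp); omega
            rw [mc, if_neg (fun h => hn1 h.2), if_pos h2, ← hl, List.erase_cons_head, hIH]

theorem solution_eq_alt (n : Int) (lost reserve : List Int) :
    solution n lost reserve = solution_alt n lost reserve := by
  simp only [solution, solution_alt]
  set I1 := PySem.Set.inter (PySem.Set.ofList reserve) (PySem.Set.ofList lost) with hI1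
  set I2 := PySem.Set.inter (PySem.Set.ofList lost) (PySem.Set.ofList reserve) with hI2
  set lost1 := PySem.Set.diff (PySem.Set.ofList lost) I1 with hlost1
  set lost2 := PySem.Set.diff (PySem.Set.ofList lost) I2 with hlost2
  set resA := PySem.Set.diff (PySem.Set.ofList reserve) I1 with hresA
  set resB := PySem.Set.diff (PySem.Set.ofList reserve) I2 with hresB
  set p : Int → Bool := fun x => decide (0 < x ∧ x ≤ n) with hp
  set R2 := PySem.List.sorted resA (fun x => x) false with hR2
  set L := PySem.List.sorted (lost2.filter p) (fun x => x) false with hL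
  -- memberships
  have memI1 : ∀ x : Int, x ∈ I1 ↔ x ∈ reserve ∧ x ∈ lost := by
    intro x; rw [hI1, PySem.Set.mem_inter]; simp [PySem.Set.mem_ofList]
  have memI2 : ∀ x : Int, x ∈ I2 ↔ x ∈ lost ∧ x ∈ reserve := by
    intro x; rw [hI2, PySem.Set.mem_inter]; simp [PySem.Set.mem_ofList]
  have memlost1 : ∀ x : Int, x ∈ lost1 ↔ x ∈ lost ∧ ¬(x ∈ reserve) := by
    intro x; rw [hlost1, PySem.Set.mem_diff, memI1]; simp [PySem.Set.mem_ofList]; tauto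
  have memlost2 : ∀ x : Int, x ∈ lost2 ↔ x ∈ lost ∧ ¬(x ∈ reserve) := by
    intro x; rw [hlost2, PySem.Set.mem_diff, memI2]; simp [PySem.Set.mem_ofList]; tauto
  have memresA : ∀ x : Int, x ∈ resA ↔ x ∈ reserve ∧ ¬(x ∈ lost) := by
    intro x; rw [hresA, PySem.Set.mem_diff, memI1]; simp [PySem.Set.mem_ofList]; tauto
  have memresB : ∀ x : Int, x ∈ resB ↔ x ∈ reserve ∧ ¬(x ∈ lost) := by
    intro x; rw [hresB, PySem.Set.mem_diff, memI2]; simp [PySem.Set.mem_ofList]; tauto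
  -- nodup
  have ndlost1 : lost1.Nodup := PySem.Set.nodup_diff _ _ (PySem.Set.nodup_ofList lost)
  have ndlost2 : lost2.Nodup := PySem.Set.nodup_diff _ _ (PySem.Set.nodup_ofList lost)
  have ndresA : resA.Nodup := PySem.Set.nodup_diff _ _ (PySem.Set.nodup_ofList reserve)
  have ndresB : resB.Nodup := PySem.Set.nodup_diff _ _ (PySem.Set.nodup_ofList reserve)
  -- perms
  have permlost : lost1.Perm lost2 := by
    rw [List.perm_ext_iff_of_nodup ndlost1 ndlost2]
    intro x; rw [memlost1, memlost2]
  have permres : resA.Perm resB := by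
    rw [List.perm_ext_iff_of_nodup ndresA ndresB]
    intro x; rw [memresA, memresB]
  -- R2 is sorted strictly and the two reserve lists sort to the same list
  have ndR2 : R2.Nodup := ((PySem.List.sorted_perm resA (fun x => x) false).nodup_iff).mpr ndresA
  have hR2sorted : R2.Pairwise (· < ·) := by
    have hle : R2.Pairwise (· ≤ ·) := by
      have := PySem.List.sorted_pairwise (xs := resA) (key := fun x => x) (κ := Int)
      simpa using this
    exact (hle.and ndR2).imp (fun h => lt_of_le_of_ne h.1 h.2)
  have hRBeq : PySem.List.sorted resB (fun x => x) false = R2 := by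
    apply PySem.List.sorted_eq_of_perm_of_pairwise_lt
    · exact ((PySem.List.sorted_perm resA (fun x => x) false).trans permres)
    · simpa using hR2sorted
  -- L is sorted strictly, in-range, and a permutation of lost1.filter p
  have ndL : L.Nodup :=
    ((PySem.List.sorted_perm (lost2.filter p) (fun x => x) false).nodup_iff).mpr (ndlost2.filter p)
  have hLsorted : L.Pairwise (· < ·) := by
    have hle : L.Pairwise (· ≤ ·) := by
      have := PySem.List.sorted_pairwise (xs := lost2.filter p) (key := fun x => x) (κ := Int)
      simpa using this
    exact (hle.and ndL).imp (fun h => lt_of_le_of_ne h.1 h.2)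
  have hLperm : (lost1.filter p).Perm L :=
    (permlost.filter p).trans (PySem.List.sorted_perm (lost2.filter p) (fun x => x) false).symm
  have hLmem : ∀ x ∈ L, 0 < x ∧ x ≤ n := by
    intro x hx
    have : x ∈ lost2.filter p := (PySem.List.sorted_perm (lost2.filter p) (fun x => x) false).mem_iff.mp hx
    have := List.of_mem_filter this
    rw [hp] at this; simpa using this
  have hdisj : ∀ r ∈ R2, r ∉ L := by
    intro r hr hrL
    have hrA : r ∈ resA := (PySem.List.sorted_perm resA (fun x => x) false).mem_iff.mp hr
    have hrres := (memresA r).mp hrA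
    have hrl : r ∈ lost2.filter p :=
      (PySem.List.sorted_perm (lost2.filter p) (fun x => x) false).mem_iff.mp hrL
    have := (memlost2 r).mp (List.mem_of_mem_filter hrl)
    exact hrres.2 this.1
  -- chain the lemmas
  have hmc : mc n R2 lost1 = tpLoop L R2 := by
    rw [mc_filter, mc_perm n R2 _ _ hLperm]
    exact mc_eq_tpLoop n (L.length + R2.length) L R2 (le_refl _) hLsorted hR2sorted hLmem hdisj
  rw [hRBeq]
  have hfold := foldl_aStep_length n R2 lost1
  have hlenlost : lost1.length = lost2.length := permlost.length_eq
  have hlenL : (lost1.filter p).length = L.length := hLperm.length_eq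
  have hlenfil : (lost2.filter p).length = L.length :=
    (PySem.List.sorted_perm (lost2.filter p) (fun x => x) false).symm.length_eq
  rw [hfold, hmc]
  omega

-- ===== VERDICT (by name: the statement is the Claim_ definition above) =====
theorem solution_spec : Claim_equal_solution := by
  intro n lost reserve _
  unfold Spec_solution
  exact solution_eq_alt n lost reserve
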